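-- pv_equiv track=rewrite | github.com/lambda-maniac/py_markov_chains_discord_bot | Markov.py | limit_repetitions
-- ===== SOURCE A (Python) =====
-- def limit_repetitions(string: str, max_repetitions: int) -> str:
--     string_prime   = ""
--     repeated_chars = ""
--     quantity       = max_repetitions
--
--     for char in string:
--         if char in repeated_chars:
--             quantity -= 1
--         else:
--             repeated_chars = ""
--             quantity       = max_repetitions
--
--         if quantity > 0:
--             string_prime += char
--
--         repeated_chars += char
--
--     return string_prime
-- ===== SOURCE B (Python) =====
-- def limit_repetitions(string: str, max_repetitions: int) -> str:
--     cap = max(max_repetitions, 0)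
--     parts = []
--     i = 0
--     n = len(string)
--     while i < n:
--         j = i
--         while j < n and string[j] == string[i]:
--             j += 1
--         parts.append(string[i] * min(j - i, cap))
--         i = j
--     return "".join(parts)
-- ===== Notes on version B (the rewrite author's own statement) =====
-- stated objective: alternative
-- what changed: B scans the string run-by-run with two indices and emits min(run length, max(cap,0)) copies per maximal run, instead of A's per-character loop maintaining a repeated-chars membership string and a decrementing counter.
import Mathlib
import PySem

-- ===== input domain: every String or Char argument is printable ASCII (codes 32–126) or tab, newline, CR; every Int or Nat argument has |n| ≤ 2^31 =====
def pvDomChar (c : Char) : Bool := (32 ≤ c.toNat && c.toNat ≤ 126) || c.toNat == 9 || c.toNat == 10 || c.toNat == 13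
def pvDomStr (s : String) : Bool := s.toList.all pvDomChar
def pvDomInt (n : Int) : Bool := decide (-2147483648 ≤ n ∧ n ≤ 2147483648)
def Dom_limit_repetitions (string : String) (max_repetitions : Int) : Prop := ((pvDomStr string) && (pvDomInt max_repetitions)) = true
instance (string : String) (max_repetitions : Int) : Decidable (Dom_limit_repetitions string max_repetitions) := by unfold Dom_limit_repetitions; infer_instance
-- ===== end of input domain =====

-- B caps each maximal run directly by index scanning (one pass over runs, no per-char
-- membership test or counter); alternative decomposition, same exact result.

-- ===== PORT A =====
-- one step of A's for-loop; state = (string_prime, repeated_chars, quantity)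
def lrStep (max_repetitions : Int) (st : List Char × List Char × Int) (ch : Char) :
    List Char × List Char × Int :=
  let sp := st.1
  let rc := st.2.1
  let q := st.2.2
  let p : List Char × Int := if rc.contains ch then (rc, q - 1) else ([], max_repetitions)
  let sp' := if p.2 > 0 then sp ++ [ch] else sp
  (sp', p.1 ++ [ch], p.2)

def limit_repetitions (string : String) (max_repetitions : Int) : String :=
  String.mk (string.toList.foldl (lrStep max_repetitions) ([], [], max_repetitions)).1

-- ===== PORT B =====
-- outer while loop of Source B: peel off one maximal run at a time, keep min(run length, cap) chars
def lrRuns (cap : Int) : List Char → List Char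
  | [] => []
  | c :: rest =>
      List.replicate (min ((rest.takeWhile (fun x => x == c)).length + 1) cap.toNat) c
        ++ lrRuns cap (rest.dropWhile (fun x => x == c))
termination_by l => l.length
decreasing_by
  simp only [List.length_cons]
  exact Nat.lt_succ_of_le (List.length_dropWhile_le _ _)

def limit_repetitions_alt (string : String) (max_repetitions : Int) : String :=
  String.mk (lrRuns (max max_repetitions 0) string.toList)

-- ===== PRECONDITION & SPEC =====
def Spec_limit_repetitions (string : String) (max_repetitions : Int) (out : String) : Prop := out = limit_repetitions_alt string max_repetitions
instance (string : String) (max_repetitions : Int) (out : String) : Decidable (Spec_limit_repetitions string max_repetitions out) := by unfold Spec_limit_repetitions; infer_instance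

-- ===== CLAIM (what is proved, stated in full; the proofs are below) =====
def Claim_equal_limit_repetitions : Prop := ∀ (string : String) (max_repetitions : Int), Dom_limit_repetitions string max_repetitions → Spec_limit_repetitions string max_repetitions (limit_repetitions string max_repetitions)

-- ===== LEMMAS AND PROOFS =====

lemma replicate_contains_eq {c d : Char} {k : Nat} :
    (List.replicate (k + 1) c).contains d = (d == c) := by
  induction k with
  | zero =>
    simp only [List.replicate, List.contains_cons, List.contains_nil, Bool.or_false]
  | succ k ih =>
    rw [show List.replicate (k + 1 + 1) c = c :: List.replicate (k + 1) c from rfl,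
      List.contains_cons, ih, Bool.or_self]

-- A's loop across a run of j more copies of c, with repeated_chars already holding k+1 copies
lemma lrStep_run (m : Int) (c : Char) :
    ∀ (j : Nat) (sp : List Char) (k : Nat) (q : Int),
      (List.replicate j c).foldl (lrStep m) (sp, List.replicate (k + 1) c, q) =
        (sp ++ List.replicate (min j (q - 1).toNat) c,
         List.replicate (k + 1 + j) c, q - j) := by
  intro j
  induction j with
  | zero => intro sp k q; simp
  | succ j ih =>
    intro sp k q
    rw [show List.replicate (j + 1) c = c :: List.replicate j c from rfl, List.foldl_cons]
    have hmem : c ∈ List.replicate (k + 1) c := by simp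
    have hstep : lrStep m (sp, List.replicate (k + 1) c, q) c =
        ((if q - 1 > 0 then sp ++ [c] else sp), List.replicate (k + 1 + 1) c, q - 1) := by
      simp [lrStep, hmem, ← List.replicate_succ']
    rw [hstep, ih]
    simp only [Prod.mk.injEq]
    refine ⟨?_, ?_, ?_⟩
    · by_cases hq : q - 1 > 0
      · have hcnt : min (j + 1) (q - 1).toNat = min j (q - 1 - 1).toNat + 1 := by omega
        rw [if_pos hq, hcnt, List.replicate_succ]
        simp
      · have hz : (q - 1).toNat = 0 := by omega
        have hz2 : (q - 1 - 1).toNat = 0 := by omega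
        rw [if_neg hq, hz, hz2]
        simp
    · congr 1
      omega
    · push_cast
      ring

lemma takeWhile_eq_replicate (c : Char) (l : List Char) :
    l.takeWhile (fun x => x == c) =
      List.replicate (l.takeWhile (fun x => x == c)).length c := by
  apply List.eq_replicate_of_mem
  intro b hb
  have := List.mem_takeWhile_imp hb
  simpa using this

lemma head_dropWhile_ne (c : Char) :
    ∀ (l : List Char) (d : Char),
      (l.dropWhile (fun x => x == c)).head? = some d → d ≠ c := by
  intro l
  induction l with
  | nil => intro d h; simp [List.dropWhile] at h
  | cons a as ih =>
    intro d h
    by_cases ha : a = c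
    · subst ha
      rw [List.dropWhile_cons_of_pos (by simp)] at h
      exact ih d h
    · rw [List.dropWhile_cons_of_neg (by simp [ha])] at h
      simp only [List.head?_cons, Option.some.injEq] at h
      subst h
      exact ha

-- main invariant: if the next char is not in repeated_chars, A's loop forgets the old state
lemma lrMain (m : Int) :
    ∀ (n : Nat) (l : List Char), l.length ≤ n →
      ∀ (sp rc : List Char) (q : Int),
        (∀ d, l.head? = some d → rc.contains d = false) →
        (l.foldl (lrStep m) (sp, rc, q)).1 = sp ++ lrRuns (max m 0) l := by
  intro n
  induction n with
  | zero =>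
    intro l hl sp rc q _
    have : l = [] := List.eq_nil_of_length_eq_zero (Nat.le_zero.mp hl)
    subst this; simp [lrRuns]
  | succ n ih =>
    intro l hl sp rc q hhead
    match l with
    | [] => simp [lrRuns]
    | c :: rest =>
      have hrc : rc.contains c = false := hhead c rfl
      have hmem : c ∉ rc := by simpa using hrc
      rw [List.foldl_cons]
      have hstep : lrStep m (sp, rc, q) c =
          ((if m > 0 then sp ++ [c] else sp), List.replicate 1 c, m) := by
        simp [lrStep, hmem]
      rw [hstep]
      set t := (rest.takeWhile (fun x => x == c)).length with ht
      have hruns : lrRuns (max m 0) (c :: rest) =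
          List.replicate (min (t + 1) (max m 0).toNat) c
            ++ lrRuns (max m 0) (rest.dropWhile (fun x => x == c)) := by
        rw [lrRuns]
      rw [hruns]
      have hsplit : rest = List.replicate t c ++ rest.dropWhile (fun x => x == c) := by
        conv_lhs => rw [← List.takeWhile_append_dropWhile (p := fun x => x == c) (l := rest)]
        congr 1
        rw [ht]
        exact takeWhile_eq_replicate c rest
      conv_lhs => rw [hsplit]
      rw [List.foldl_append]
      have hrun := lrStep_run m c t (if m > 0 then sp ++ [c] else sp) 0 m
      rw [show List.replicate 1 c = List.replicate (0 + 1) c from rfl, hrun]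
      have hlen : (rest.dropWhile (fun x => x == c)).length ≤ n := by
        have h1 := List.length_dropWhile_le (fun x => x == c) rest
        have h2 : rest.length + 1 ≤ n + 1 := by simpa using hl
        omega
      rw [ih _ hlen _ _ _ ?_]
      · by_cases hm : m > 0
        · have hcnt : min (t + 1) (max m 0).toNat = min t (m - 1).toNat + 1 := by omega
          rw [if_pos hm, hcnt, List.replicate_succ]
          simp
        · have hz1 : (m - 1).toNat = 0 := by omega
          have hz2 : (max m 0).toNat = 0 := by omega
          simp [if_neg hm, hz1, hz2]
      · intro d hd
        have hne := head_dropWhile_ne c _ d hd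
        rw [show (0 : Nat) + 1 + t = t + 1 from by omega, replicate_contains_eq]
        simpa using hne

-- ===== VERDICT (by name: the statement is the Claim_ definition above) =====
theorem limit_repetitions_spec : Claim_equal_limit_repetitions := by
  intro s m _
  show limit_repetitions s m = limit_repetitions_alt s m
  unfold limit_repetitions limit_repetitions_alt
  congr 1
  have := lrMain m s.toList.length s.toList (le_refl _) [] [] m (by intro d hd; rfl)
  simpa using this
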